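-- pv_equiv track=rewrite | github.com/danoscarmike/adventofcode | 2024/day8.py | part_two
-- ===== SOURCE A (Python) =====
-- import itertools
-- from collections import defaultdict
--
-- def is_valid_location(grid, location):
--     return 0 <= location[0] < len(grid) and 0 <= location[1] < len(grid[0])
--
-- def find_similar_antennas(grid):
--     antennas = defaultdict(list)
--     for row in grid:
--         for cell in row:
--             if cell == "." or cell in antennas.keys():
--                 continue
--             else:
--                  antenna_locations = []
--                  for i, line in enumerate(grid):
--                     for j, col in enumerate(line):
--                         if col == cell:
--                             antenna_locations.append((i, j))
--
--             antennas[cell] = antenna_locations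
--
--     return antennas
--
-- def find_all_antinodes(grid, antenna_pair, harmonics=False):
--     antinodes = []
--     offset = (antenna_pair[1][0] - antenna_pair[0][0], antenna_pair[1][1] - antenna_pair[0][1])
--     up_antinode = (antenna_pair[0][0] - offset[0], antenna_pair[0][1] - offset[1])
--     if is_valid_location(grid, up_antinode):
--         antinodes.append(up_antinode)
--     down_antinode = (antenna_pair[1][0] + offset[0], antenna_pair[1][1] + offset[1])
--     if is_valid_location(grid, down_antinode):
--         antinodes.append(down_antinode)
--     if not harmonics:
--         return antinodes
--     else:
--         # Check for additional antinodes (upward)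
--         on_grid = True
--         while on_grid:
--             next_up_antinode = up_antinode[0] - offset[0], up_antinode[1] - offset[1]
--             if is_valid_location(grid, next_up_antinode):
--                 antinodes.append(next_up_antinode)
--                 up_antinode = next_up_antinode
--             else:
--                 on_grid = False
--
--         # Check for additional antinodes (downward)
--         on_grid = True
--         while on_grid:
--             next_down_antinode = down_antinode[0] + offset[0], down_antinode[1] + offset[1]
--             if is_valid_location(grid, next_down_antinode):
--                 antinodes.append(next_down_antinode)
--                 down_antinode = next_down_antinode
--             else:
--                 on_grid = False
--
--     return antinodes
--
-- def part_two(grid) -> int: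
--     antennas = find_similar_antennas(grid)
--     antinodes = set()
--
--     for antenna in antennas.keys():
--         for pair in itertools.combinations(antennas[antenna], 2):
--             antinodes.update(pair)
--             antinodes.update(find_all_antinodes(grid, pair, True))
--
--     return len(antinodes)
-- ===== SOURCE B (Python) =====
-- from itertools import combinations
-- from collections import defaultdict
--
--
-- def _ray(h, w, start, dr, dc):
--     """start itself, the nearest antinode, then the further harmonics while on the grid."""
--     pts = [start]
--     r, c = start[0] + dr, start[1] + dc
--     if 0 <= r < h and 0 <= c < w:
--         pts.append((r, c))
--     r, c = r + dr, c + dc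
--     while 0 <= r < h and 0 <= c < w:
--         pts.append((r, c))
--         r, c = r + dr, c + dc
--     return pts
--
--
-- def part_two(grid) -> int:
--     h = len(grid)
--     w = len(grid[0]) if grid else 0
--     groups = defaultdict(list)
--     for i, row in enumerate(grid):
--         for j, c in enumerate(row):
--             if c != ".":
--                 groups[c].append((i, j))
--     antinodes = set()
--     for pts in groups.values():
--         for a, p0 in enumerate(pts):
--             for p1 in pts[a + 1:]:
--                 di, dj = p1[0] - p0[0], p1[1] - p0[1]
--                 antinodes.update(_ray(h, w, p0, -di, -dj))
--                 antinodes.update(_ray(h, w, p1, di, dj))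
--     return len(antinodes)
-- ===== Notes on version B (the rewrite author's own statement) =====
-- stated objective: simpler
-- what changed: B builds the frequency->locations dict in one pass over the grid (A rescans the whole grid once per distinct frequency) and collects each pair's antinodes with one uniform outward-ray helper applied to both endpoints, replacing A's antenna-insertion plus immediate-antinode checks plus two separate while loops.
import Mathlib
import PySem

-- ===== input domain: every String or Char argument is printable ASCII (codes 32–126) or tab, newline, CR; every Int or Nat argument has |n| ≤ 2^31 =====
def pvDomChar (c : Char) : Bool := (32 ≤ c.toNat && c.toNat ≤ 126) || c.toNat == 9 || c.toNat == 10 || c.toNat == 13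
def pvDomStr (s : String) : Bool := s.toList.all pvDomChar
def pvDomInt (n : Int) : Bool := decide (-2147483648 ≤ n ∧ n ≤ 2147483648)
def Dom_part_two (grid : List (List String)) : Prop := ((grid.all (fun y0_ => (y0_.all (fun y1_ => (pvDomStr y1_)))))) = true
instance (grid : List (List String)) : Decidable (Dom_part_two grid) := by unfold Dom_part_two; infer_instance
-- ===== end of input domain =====

-- B groups the antennas in one pass and walks each pair's two rays with one uniform helper,
-- instead of A's per-frequency whole-grid rescans and four-phase antinode collection; same return value.

-- ===== PORT A =====
-- is_valid_location; Python reads len(grid[0]), which is only evaluated with grid nonempty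
-- (it is reached only when a pair of equal antenna cells exists), so headD [] is exact there.
def validLoc (grid : List (List String)) (loc : Int × Int) : Bool :=
  decide (0 ≤ loc.1) && decide (loc.1 < (grid.length : Int)) &&
    decide (0 ≤ loc.2) && decide (loc.2 < (((grid.headD []).length : Int)))

-- the inner double scan of find_similar_antennas collecting all locations of `cell`
def scanLocs (grid : List (List String)) (cell : String) : List (Int × Int) :=
  (PySem.List.enumerate grid).foldl (fun acc il =>
    (PySem.List.enumerate il.2).foldl (fun acc2 jc =>
      if jc.2 == cell then acc2 ++ [(il.1, jc.1)] else acc2) acc) []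

def findSimilarAntennas (grid : List (List String)) : PySem.Dict String (List (Int × Int)) :=
  grid.foldl (fun d row =>
    row.foldl (fun d cell =>
      if cell == "." || d.contains cell then d
      else d.insert cell (scanLocs grid cell)) d) PySem.Dict.empty

-- the upward while loop: repeatedly step by -offset from `up`, appending while on the grid.
-- Fuel bounds the iteration count; grid.length + width + 2 steps always suffice for the
-- offsets that occur (offset ≠ (0,0): a coordinate moves monotonically and leaves the grid).
def walkUpA (grid : List (List String)) (off : Int × Int) : Nat → (Int × Int) → List (Int × Int)
  | 0, _ => []
  | fuel + 1, up =>
    let nxt := (up.1 - off.1, up.2 - off.2)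
    if validLoc grid nxt then nxt :: walkUpA grid off fuel nxt else []

def walkDownA (grid : List (List String)) (off : Int × Int) : Nat → (Int × Int) → List (Int × Int)
  | 0, _ => []
  | fuel + 1, dn =>
    let nxt := (dn.1 + off.1, dn.2 + off.2)
    if validLoc grid nxt then nxt :: walkDownA grid off fuel nxt else []

-- find_all_antinodes; the pair comes in as the 2-element list produced by itertools.combinations
def findAllAntinodes (grid : List (List String)) (pr : List (Int × Int)) (harmonics : Bool) :
    List (Int × Int) :=
  let p0 := PySem.List.pyGetD pr 0 (0, 0)
  let p1 := PySem.List.pyGetD pr 1 (0, 0)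
  let off := (p1.1 - p0.1, p1.2 - p0.2)
  let a0 : List (Int × Int) := []
  let up := (p0.1 - off.1, p0.2 - off.2)
  let a1 := if validLoc grid up then a0 ++ [up] else a0
  let dn := (p1.1 + off.1, p1.2 + off.2)
  let a2 := if validLoc grid dn then a1 ++ [dn] else a1
  if !harmonics then a2
  else
    let fuel := grid.length + (grid.headD []).length + 2
    let a3 := a2 ++ walkUpA grid off fuel up
    a3 ++ walkDownA grid off fuel dn

def part_two (grid : List (List String)) : Int :=
  let antennas := findSimilarAntennas grid
  let antinodes : PySem.Set (Int × Int) := PySem.Set.empty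
  let antinodes := antennas.keys.foldl (fun s antenna =>
    (PySem.List.combinations (antennas.getD antenna []) 2).foldl (fun s pr =>
      let s := PySem.Set.update s pr
      PySem.Set.update s (findAllAntinodes grid pr true)) s) antinodes
  PySem.Set.len antinodes

-- ===== PORT B =====
def inBounds (h w : Nat) (p : Int × Int) : Bool :=
  decide (0 ≤ p.1) && decide (p.1 < (h : Int)) && decide (0 ≤ p.2) && decide (p.2 < (w : Int))

-- the `while` of _ray, with the same fuel bound as the A-side walks
def restWalkB (h w : Nat) (step : Int × Int) : Nat → (Int × Int) → List (Int × Int)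
  | 0, _ => []
  | fuel + 1, p =>
    if inBounds h w p then p :: restWalkB h w step fuel (p.1 + step.1, p.2 + step.2) else []

-- _ray: the start point, the nearest antinode if on the grid, then the further harmonics
def rayB (h w : Nat) (start step : Int × Int) : List (Int × Int) :=
  let first := (start.1 + step.1, start.2 + step.2)
  [start] ++ (if inBounds h w first then [first] else []) ++
    restWalkB h w step (h + w + 2) (first.1 + step.1, first.2 + step.2)

-- the single grouping pass: defaultdict(list); groups[c].append((i, j))
def groupAntennas (grid : List (List String)) : PySem.Dict String (List (Int × Int)) :=
  (PySem.List.enumerate grid).foldl (fun d ir =>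
    (PySem.List.enumerate ir.2).foldl (fun d jc =>
      if jc.2 != "." then d.modify jc.2 [] (fun l => l ++ [(ir.1, jc.1)]) else d) d)
    PySem.Dict.empty

def part_two_alt (grid : List (List String)) : Int :=
  let h := grid.length
  let w := (grid.headD []).length      -- len(grid[0]) if grid else 0
  let groups := groupAntennas grid
  let antinodes := groups.values.foldl (fun s pts =>
    (PySem.List.enumerate pts).foldl (fun s ap =>
      (PySem.List.slice pts (some (ap.1 + 1)) none).foldl (fun s p1 =>
        let d := (p1.1 - ap.2.1, p1.2 - ap.2.2)
        let s := PySem.Set.update s (rayB h w ap.2 (-d.1, -d.2))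
        PySem.Set.update s (rayB h w p1 d)) s) s) (PySem.Set.empty : PySem.Set (Int × Int))
  PySem.Set.len antinodes

-- ===== PRECONDITION & SPEC =====
def Spec_part_two (grid : List (List String)) (out : Int) : Prop := out = part_two_alt grid
instance (grid : List (List String)) (out : Int) : Decidable (Spec_part_two grid out) := by unfold Spec_part_two; infer_instance

-- ===== CLAIM (what is proved, stated in full; the proofs are below) =====
def Claim_equal_part_two : Prop := ∀ (grid : List (List String)), Dom_part_two grid → Spec_part_two grid (part_two grid)

-- ===== LEMMAS AND PROOFS =====

-- the reading-order stream of (cell, position) pairs both dict builders process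
def cellStream (grid : List (List String)) : List (String × (Int × Int)) :=
  (PySem.List.enumerate grid).flatMap (fun ir =>
    (PySem.List.enumerate ir.2).map (fun jc => (jc.2, (ir.1, jc.1))))

def fnOf (grid : List (List String)) : String → String × List (Int × Int) :=
  fun c => (c, scanLocs grid c)

-- invariant relating the two Set accumulators: same elements, both duplicate-free
def SInv (s t : PySem.Set (Int × Int)) : Prop :=
  s.Nodup ∧ t.Nodup ∧ ∀ z, z ∈ s ↔ z ∈ t

-- iterate an action over every ordered pair (x, y), x strictly before y, of a list
def pairFold {σ : Type} (g : (Int × Int) → (Int × Int) → σ → σ) : List (Int × Int) → σ → σ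
  | [], s => s
  | x :: xs, s => pairFold g xs (xs.foldl (fun s y => g x y s) s)

lemma walkUp_eq (grid : List (List String)) (off : Int × Int) :
    ∀ (fuel : Nat) (up : Int × Int),
      walkUpA grid off fuel up =
        restWalkB grid.length (grid.headD []).length (-off.1, -off.2) fuel
          (up.1 - off.1, up.2 - off.2) := by
  intro fuel
  induction fuel with
  | zero => intro up; rfl
  | succ f ih =>
    intro up
    simp only [walkUpA, restWalkB]
    rw [show validLoc grid (up.1 - off.1, up.2 - off.2)
        = inBounds grid.length (grid.headD []).length (up.1 - off.1, up.2 - off.2) from rfl]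
    split
    · rw [ih]; ring_nf
    · rfl

lemma walkDown_eq (grid : List (List String)) (off : Int × Int) :
    ∀ (fuel : Nat) (dn : Int × Int),
      walkDownA grid off fuel dn =
        restWalkB grid.length (grid.headD []).length off fuel
          (dn.1 + off.1, dn.2 + off.2) := by
  intro fuel
  induction fuel with
  | zero => intro dn; rfl
  | succ f ih =>
    intro dn
    simp only [walkDownA, restWalkB]
    rw [show validLoc grid (dn.1 + off.1, dn.2 + off.2)
        = inBounds grid.length (grid.headD []).length (dn.1 + off.1, dn.2 + off.2) from rfl]
    split
    · rw [ih]
    · rfl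

-- per-pair contributed elements agree: A adds the pair, the two immediate antinodes and the
-- two harmonic walks; B adds the two outward rays from the two antennas
lemma pair_mem (grid : List (List String)) (x y z : Int × Int) :
    (z ∈ [x, y] ∨ z ∈ findAllAntinodes grid [x, y] true) ↔
      (z ∈ rayB grid.length (grid.headD []).length x (-(y.1 - x.1), -(y.2 - x.2)) ∨
       z ∈ rayB grid.length (grid.headD []).length y (y.1 - x.1, y.2 - x.2)) := by
  simp only [findAllAntinodes, rayB]
  norm_num [PySem.List.pyGetD_ofNat', PySem.List.pyGetD_natCast]
  rw [walkUp_eq, walkDown_eq]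
  rw [show validLoc grid (x.1 - (y.1 - x.1), x.2 - (y.2 - x.2))
      = inBounds grid.length (grid.headD []).length (x.1 - (y.1 - x.1), x.2 - (y.2 - x.2)) from rfl,
    show validLoc grid (y.1 + (y.1 - x.1), y.2 + (y.2 - x.2))
      = inBounds grid.length (grid.headD []).length (y.1 + (y.1 - x.1), y.2 + (y.2 - x.2)) from rfl]
  ring_nf
  split_ifs <;> simp_all <;> tauto

-- one congruence, reused at the key level and at the pair level
lemma foldl_SInv {α σ : Type} (Inv : σ → σ → Prop) (l : List α)
    (FA FB : σ → α → σ)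
    (h : ∀ a ∈ l, ∀ s t, Inv s t → Inv (FA s a) (FB t a)) :
    ∀ s t, Inv s t → Inv (l.foldl FA s) (l.foldl FB t) := by
  induction l with
  | nil => intro s t hst; simpa using hst
  | cons x xs ih =>
    intro s t hst
    simp only [List.foldl_cons]
    exact ih (fun a ha => h a (List.mem_cons_of_mem _ ha)) _ _ (h x (List.mem_cons_self) _ _ hst)

-- A's inner fold over itertools.combinations(pts, 2) is a pairFold
lemma A_inner {σ : Type} (G : List (Int × Int) → σ → σ) :
    ∀ (pts : List (Int × Int)) (s : σ),
      (PySem.List.combinations pts 2).foldl (fun s pr => G pr s) s =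
        pairFold (fun x y s => G [x, y] s) pts s := by
  intro pts
  induction pts with
  | nil => intro s; rfl
  | cons x xs ih =>
    intro s
    rw [show (2 : Nat) = 1 + 1 from rfl, PySem.List.combinations_cons_succ,
      PySem.List.combinations_one, List.foldl_append, List.foldl_map, List.foldl_map]
    simpa [pairFold] using ih _

-- B's inner fold (enumerate + tail slice) is the same pairFold
lemma B_inner {σ : Type} (g : (Int × Int) → (Int × Int) → σ → σ) :
    ∀ (pts pref : List (Int × Int)) (s : σ),
      (PySem.List.enumerate pts (pref.length : Int)).foldl (fun s ap =>
          (PySem.List.slice (pref ++ pts) (some (ap.1 + 1)) none).foldl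
            (fun s p1 => g ap.2 p1 s) s) s =
        pairFold g pts s := by
  intro pts
  induction pts with
  | nil => intro pref s; rfl
  | cons x xs ih =>
    intro pref s
    rw [PySem.List.enumerate_cons, List.foldl_cons]
    have h1 : PySem.List.slice (pref ++ x :: xs) (some ((pref.length : Int) + 1)) none = xs := by
      rw [PySem.List.slice_from _ (by positivity)]
      have : ((pref.length : Int) + 1).toNat = pref.length + 1 := by omega
      rw [this]
      rw [List.drop_append]
      simp
    rw [h1]
    have h2 : ((pref.length : Int) + 1) = (((pref ++ [x]).length : Nat) : Int) := by
      simp [List.length_append]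
    rw [h2]
    have h3 : pref ++ x :: xs = (pref ++ [x]) ++ xs := by simp
    calc (PySem.List.enumerate xs ((((pref ++ [x]).length : Nat)) : Int)).foldl
          (fun s ap => (PySem.List.slice (pref ++ x :: xs) (some (ap.1 + 1)) none).foldl
            (fun s p1 => g ap.2 p1 s) s) (xs.foldl (fun s y => g x y s) s)
        = (PySem.List.enumerate xs ((((pref ++ [x]).length : Nat)) : Int)).foldl
          (fun s ap => (PySem.List.slice ((pref ++ [x]) ++ xs) (some (ap.1 + 1)) none).foldl
            (fun s p1 => g ap.2 p1 s) s) (xs.foldl (fun s y => g x y s) s) := by rw [← h3]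
      _ = pairFold g xs (xs.foldl (fun s y => g x y s) s) := ih (pref ++ [x]) _
      _ = pairFold g (x :: xs) s := rfl

lemma A_items (grid : List (List String)) :
    ∀ (cs : List String) (L : List String),
      (cs.foldl (fun d cell =>
          if cell == "." || d.contains cell then d
          else d.insert cell (scanLocs grid cell))
        (PySem.Dict.mk (L.map (fnOf grid)))).items
        = (PySem.Set.update L (cs.filter (fun c => !(c == ".")))).map (fnOf grid) := by
  intro cs
  induction cs with
  | nil => intro L; rfl
  | cons c cs ih =>
    intro L
    have hmemc : (PySem.Dict.mk (L.map (fnOf grid))).contains c = decide (c ∈ L) := by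
      rw [PySem.Dict.contains_mk, List.any_map]
      simp only [Function.comp_def, fnOf]
      rw [Bool.eq_iff_iff, List.any_eq_true, decide_eq_true_iff]
      constructor
      · rintro ⟨a, ha, hb⟩; exact (beq_iff_eq.mp hb) ▸ ha
      · intro h; exact ⟨c, h, beq_self_eq_true c⟩
    simp only [List.foldl_cons, List.filter_cons]
    by_cases hdot : c = "."
    · subst hdot
      rw [if_pos (by simp)]
      rw [show (!("." == ("." : String))) = false by simp]
      simpa using ih L
    · rw [show (!(c == ("." : String))) = true by simpa using hdot]
      simp only [if_true]
      rw [show PySem.Set.update L (c :: cs.filter (fun c => !(c == ".")))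
          = PySem.Set.update (PySem.Set.add L c) (cs.filter (fun c => !(c == "."))) from rfl]
      by_cases hc : c ∈ L
      · rw [if_pos (by rw [hmemc]; simp [hc])]
        rw [PySem.Set.add_of_mem hc]
        exact ih L
      · rw [if_neg (by rw [hmemc]; simp [hc, hdot])]
        rw [PySem.Set.add_of_not_mem hc]
        have hins : (PySem.Dict.mk (L.map (fnOf grid))).insert c (scanLocs grid c)
            = PySem.Dict.mk ((L ++ [c]).map (fnOf grid)) := by
          apply PySem.Dict.ext
          rw [PySem.Dict.items_insert_of_not_contains _ _ (by rw [hmemc]; simp [hc])]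
          simp [fnOf]
        rw [hins]
        exact ih (L ++ [c])

lemma itemsA (grid : List (List String)) :
    (findSimilarAntennas grid).items
      = (PySem.Set.ofList (grid.flatten.filter (fun c => !(c == ".")))).map (fnOf grid) := by
  rw [findSimilarAntennas, ← List.foldl_flatten]
  rw [show (PySem.Dict.empty : PySem.Dict String (List (Int × Int)))
      = PySem.Dict.mk (([] : List String).map (fnOf grid)) from rfl]
  rw [A_items grid]
  rw [PySem.Set.update_nil_left]

-- B's dict as a single fold over the flattened (cell, position) stream
lemma groupB_flat (grid : List (List String)) :
    groupAntennas grid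
      = ((cellStream grid).filter (fun p => !(p.1 == "."))).foldl
          (fun d p => d.modify p.1 [] (fun l => l ++ [p.2])) PySem.Dict.empty := by
  rw [List.foldl_filter, cellStream, List.flatMap_def, List.foldl_flatten, List.foldl_map]
  rw [groupAntennas]
  congr 1
  funext d ir
  rw [List.foldl_map]
  rfl

lemma keysB (grid : List (List String)) :
    (groupAntennas grid).keys
      = PySem.Set.ofList (((cellStream grid).filter (fun p => !(p.1 == "."))).map (·.1)) := by
  rw [groupB_flat]
  have h := PySem.Dict.keys_foldl_modify_key ((cellStream grid).filter (fun p => !(p.1 == ".")))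
    (fun p => p.1) ([] : List (Int × Int)) (fun _ p => (fun l => l ++ [p.2]))
    (PySem.Dict.empty : PySem.Dict String (List (Int × Int)))
  simp only [PySem.Dict.keys_empty, PySem.Set.update_nil_left] at h
  exact h

lemma getDB (grid : List (List String)) (c : String) :
    (groupAntennas grid).getD c []
      = ((((cellStream grid).filter (fun p => !(p.1 == "."))).filter (fun p => p.1 == c)).map (·.2)) := by
  rw [groupB_flat, PySem.Dict.getD_foldl_modify_append, PySem.Dict.getD_empty, List.nil_append]

lemma keys_nodup (grid : List (List String)) : (groupAntennas grid).keys.Nodup := by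
  rw [keysB]; exact PySem.Set.nodup_ofList _

lemma fst_cellStream (grid : List (List String)) :
    (cellStream grid).map (·.1) = grid.flatten := by
  have h0 : ∀ ir : Int × List String,
      ((PySem.List.enumerate ir.2).map (fun jc => (jc.2, (ir.1, jc.1)))).map (·.1) = ir.2 := by
    intro ir; rw [List.map_map]; exact PySem.List.map_snd_enumerate _ _
  have h1 : (cellStream grid).map (·.1)
      = ((PySem.List.enumerate grid 0).map (fun ir => ir.2)).flatten := by
    rw [cellStream, List.map_flatMap, List.flatMap_def]
    congr 1
    exact List.map_congr_left (fun a _ => h0 a)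
  rw [h1, PySem.List.map_snd_enumerate]

lemma scan_flat (grid : List (List String)) (c : String) :
    scanLocs grid c
      = (PySem.List.enumerate grid).flatMap (fun ir =>
          ((PySem.List.enumerate ir.2).filter (fun jc => jc.2 == c)).map (fun jc => (ir.1, jc.1))) := by
  rw [scanLocs]
  simp only [PySem.List.foldl_append_if]
  rw [PySem.List.foldl_append_eq_flatMap, List.nil_append]

lemma valB_eq (grid : List (List String)) (c : String) (hc : c ≠ ".") :
    ((((cellStream grid).filter (fun p => !(p.1 == "."))).filter (fun p => p.1 == c)).map (·.2))
      = scanLocs grid c := by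
  rw [List.filter_filter]
  have h1 : ((cellStream grid).filter (fun p => (p.1 == c) && !(p.1 == ".")))
      = (cellStream grid).filter (fun p => p.1 == c) := by
    apply List.filter_congr
    intro p _
    by_cases h : p.1 = c
    · simp [h, hc]
    · simp [h]
  rw [h1, cellStream, List.filter_flatMap, List.map_flatMap, scan_flat]
  congr 1
  funext ir
  rw [List.filter_map, List.map_map]
  rfl

-- the two dictionaries coincide
lemma dict_eq (grid : List (List String)) : findSimilarAntennas grid = groupAntennas grid := by
  apply PySem.Dict.ext
  rw [itemsA, PySem.Dict.items_eq_map_keys _ (keys_nodup grid) ([] : List (Int × Int)), keysB]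
  have hkeys : (((cellStream grid).filter (fun p => !(p.1 == "."))).map (·.1))
      = grid.flatten.filter (fun c => !(c == ".")) := by
    rw [← fst_cellStream, List.filter_map]
    rfl
  rw [hkeys]
  apply List.map_congr_left
  intro c hcmem
  have hc : c ≠ "." := by
    have h2 : c ∈ grid.flatten.filter (fun c => !(c == ".")) :=
      (PySem.Set.mem_ofList _ _).mp hcmem
    have hmem := List.mem_filter.mp h2
    simpa using hmem.2
  rw [fnOf, getDB, valB_eq grid c hc]

-- one pair's step preserves the invariant
lemma pair_step (grid : List (List String)) (x y : Int × Int) (s t : PySem.Set (Int × Int))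
    (h : SInv s t) :
    SInv (PySem.Set.update (PySem.Set.update s [x, y]) (findAllAntinodes grid [x, y] true))
      (PySem.Set.update
        (PySem.Set.update t (rayB grid.length (grid.headD []).length x
          (-(y.1 - x.1), -(y.2 - x.2))))
        (rayB grid.length (grid.headD []).length y (y.1 - x.1, y.2 - x.2))) := by
  obtain ⟨hs, ht, hm⟩ := h
  refine ⟨PySem.Set.nodup_update _ _ (PySem.Set.nodup_update _ _ hs),
    PySem.Set.nodup_update _ _ (PySem.Set.nodup_update _ _ ht), ?_⟩
  intro z
  simp only [PySem.Set.mem_update]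
  have hp := pair_mem grid x y z
  have hz := hm z
  tauto

lemma pairFold_SInv (grid : List (List String)) :
    ∀ (pts : List (Int × Int)) (s t : PySem.Set (Int × Int)), SInv s t →
      SInv (pairFold (fun x y s =>
          PySem.Set.update (PySem.Set.update s [x, y]) (findAllAntinodes grid [x, y] true)) pts s)
        (pairFold (fun x y t =>
          PySem.Set.update
            (PySem.Set.update t (rayB grid.length (grid.headD []).length x
              (-(y.1 - x.1), -(y.2 - x.2))))
            (rayB grid.length (grid.headD []).length y (y.1 - x.1, y.2 - x.2))) pts t) := by
  intro pts
  induction pts with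
  | nil => exact fun s t h => h
  | cons x xs ih =>
    intro s t h
    simp only [pairFold]
    exact ih _ _ (foldl_SInv SInv xs _ _ (fun y _ s t h => pair_step grid x y s t h) s t h)

-- ===== VERDICT (by name: the statement is the Claim_ definition above) =====
theorem part_two_spec : Claim_equal_part_two := by
  intro grid _
  show part_two grid = part_two_alt grid
  rw [part_two, part_two_alt]
  rw [dict_eq grid]
  rw [PySem.Dict.values_eq_map_keys _ (keys_nodup grid) ([] : List (Int × Int)), List.foldl_map]
  have hA : ∀ (s : PySem.Set (Int × Int)) (c : String),
      (PySem.List.combinations ((groupAntennas grid).getD c []) 2).foldl (fun s pr =>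
          PySem.Set.update (PySem.Set.update s pr) (findAllAntinodes grid pr true)) s =
        pairFold (fun x y s =>
          PySem.Set.update (PySem.Set.update s [x, y]) (findAllAntinodes grid [x, y] true))
          ((groupAntennas grid).getD c []) s :=
    fun s c => A_inner _ _ s
  have hB : ∀ (s : PySem.Set (Int × Int)) (c : String),
      (PySem.List.enumerate ((groupAntennas grid).getD c [])).foldl (fun s ap =>
          (PySem.List.slice ((groupAntennas grid).getD c []) (some (ap.1 + 1)) none).foldl
            (fun s p1 =>
              PySem.Set.update
                (PySem.Set.update s (rayB grid.length (grid.headD []).length ap.2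
                  (-(p1.1 - ap.2.1), -(p1.2 - ap.2.2))))
                (rayB grid.length (grid.headD []).length p1 (p1.1 - ap.2.1, p1.2 - ap.2.2))) s) s =
        pairFold (fun x y t =>
          PySem.Set.update
            (PySem.Set.update t (rayB grid.length (grid.headD []).length x
              (-(y.1 - x.1), -(y.2 - x.2))))
            (rayB grid.length (grid.headD []).length y (y.1 - x.1, y.2 - x.2)))
          ((groupAntennas grid).getD c []) s := by
    intro s c
    have h := B_inner (g := fun x y t =>
        PySem.Set.update
          (PySem.Set.update t (rayB grid.length (grid.headD []).length x
            (-(y.1 - x.1), -(y.2 - x.2))))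
          (rayB grid.length (grid.headD []).length y (y.1 - x.1, y.2 - x.2)))
      ((groupAntennas grid).getD c []) [] s
    simpa using h
  simp only [hA, hB]
  have hinv := foldl_SInv SInv (groupAntennas grid).keys _ _
    (fun c _ s t h => pairFold_SInv grid ((groupAntennas grid).getD c []) s t h)
    PySem.Set.empty PySem.Set.empty ⟨List.nodup_nil, List.nodup_nil, fun z => Iff.rfl⟩
  obtain ⟨h1, h2, h3⟩ := hinv
  rw [PySem.Set.len_eq, PySem.Set.len_eq,
    ((List.perm_ext_iff_of_nodup h1 h2).mpr h3).length_eq]
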